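-- pv_equiv track=rewrite | github.com/Ixenooz/AdventOfCode2025 | day4/part2.py | access_rolls
-- ===== SOURCE A (Python) =====
-- def access_rolls(grid, accessedRolls=0):
--     final_grid = grid.copy()
--     hauteur = len(grid)
--     largeur = len(grid[0])
--     directions = [
--     (-1, -1), (-1, 0), (-1, 1),
--     (0, -1),           (0, 1),
--     (1, -1),  (1, 0),  (1, 1)
--     ]
--     localAccessedRolls = 0
--     for line in range(hauteur):
--         for column in range(largeur):
--             if grid[line][column] == '@':
--                 count = 0
--                 for dirRow, dirCol in directions:
--                     nr, nc = line + dirRow, column + dirCol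
--                     if 0 <= nr < hauteur and 0 <= nc < largeur:
--                         if grid[nr][nc] == '@':
--                             count += 1
--                 if (count < 4):
--                     localAccessedRolls += 1
--                     final_grid[line] = final_grid[line][:column] + 'x' + final_grid[line][column+1:]
--     if localAccessedRolls == 0:
--         return accessedRolls
--     else:
--         return access_rolls(final_grid, accessedRolls + localAccessedRolls)
-- ===== SOURCE B (Python) =====
-- def access_rolls(grid, accessedRolls=0):
--     height, width = len(grid), len(grid[0])
--     cells = {(r, c) for r in range(height) for c in range(width) if grid[r][c] == '@'}
--     total = accessedRolls
--     while True:
--         keep = set()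
--         for (r, c) in cells:
--             n = 0
--             for dr in (-1, 0, 1):
--                 for dc in (-1, 0, 1):
--                     if (dr or dc) and (r + dr, c + dc) in cells:
--                         n += 1
--             if n >= 4:
--                 keep.add((r, c))
--         removed = len(cells) - len(keep)
--         if removed == 0:
--             return total
--         total += removed
--         cells = keep
-- ===== Notes on version B (the rewrite author's own statement) =====
-- stated objective: alternative
-- what changed: B extracts the set of '@' coordinates once and then filters that set each round by counting neighbours via set membership, instead of A's rescanning the full grid and rebuilding rows by string slicing in a recursive pass.
import Mathlib
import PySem

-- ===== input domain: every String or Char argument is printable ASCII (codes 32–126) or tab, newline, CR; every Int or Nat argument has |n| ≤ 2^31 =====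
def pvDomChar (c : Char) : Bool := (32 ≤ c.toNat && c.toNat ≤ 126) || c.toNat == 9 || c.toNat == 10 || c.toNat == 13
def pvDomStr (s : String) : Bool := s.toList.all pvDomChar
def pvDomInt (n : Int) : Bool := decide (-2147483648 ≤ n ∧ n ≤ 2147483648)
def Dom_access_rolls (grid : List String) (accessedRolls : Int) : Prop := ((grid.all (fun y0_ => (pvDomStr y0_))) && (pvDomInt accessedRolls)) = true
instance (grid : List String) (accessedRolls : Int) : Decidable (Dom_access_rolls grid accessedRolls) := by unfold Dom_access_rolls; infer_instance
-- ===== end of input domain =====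

-- B replaces A's repeated full-grid rescans and per-removal string splicing by synchronous
-- rounds over a set of '@' coordinates (filtering the set each round); objective: alternative.


-- ===== PORT A =====
-- grid[r][c] on in-range indices (a too-short row raises IndexError in Python: excluded by Pre_)
def pvGet2 (g : List (List Char)) (r c : Int) : Char :=
  PySem.List.pyGetD (PySem.List.pyGetD g r []) c ' '

def pvDirs : List (Int × Int) :=
  [(-1, -1), (-1, 0), (-1, 1), (0, -1), (0, 1), (1, -1), (1, 0), (1, 1)]

-- the inner 'for dirRow, dirCol in directions' loop of A
def pvCountA (g : List (List Char)) (h w line col : Int) : Int :=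
  pvDirs.foldl (fun count d =>
    if 0 ≤ line + d.1 ∧ line + d.1 < h ∧ 0 ≤ col + d.2 ∧ col + d.2 < w then
      if pvGet2 g (line + d.1) (col + d.2) = '@' then count + 1 else count
    else count) 0

-- final_grid[line] = final_grid[line][:column] + 'x' + final_grid[line][column+1:]
-- (the assignment index comes from range(hauteur), so it is nonneg and in range: List.set is exact there)
def pvMark (f : List (List Char)) (line col : Int) : List (List Char) :=
  f.set line.toNat
    (PySem.List.slice (PySem.List.pyGetD f line []) none (some col) ++ ['x'] ++
     PySem.List.slice (PySem.List.pyGetD f line []) (some (col + 1)) none)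

-- one pass of A's two nested 'for line/for column' loops; state = (final_grid, localAccessedRolls)
def pvRound (g : List (List Char)) (h w : Int) : List (List Char) × Int :=
  (PySem.List.pyRange 0 h).foldl (fun st line =>
    (PySem.List.pyRange 0 w).foldl (fun st col =>
      if pvGet2 g line col = '@' then
        if pvCountA g h w line col < 4 then (pvMark st.1 line col, st.2 + 1) else st
      else st) st) (g, 0)

-- A's tail recursion; fuel = number of grid positions + 1 only makes it structural
-- (each recursive round turns at least one '@' into 'x'; the fuel is proved sufficient below)
def pvLoopA (fuel : Nat) (g : List (List Char)) (acc : Int) : Int :=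
  match fuel with
  | 0 => acc
  | fuel + 1 =>
    let st := pvRound g (g.length : Int) (((PySem.List.pyGetD g 0 []).length : Nat) : Int)
    if st.2 = 0 then acc else pvLoopA fuel st.1 (acc + st.2)

def access_rolls (grid : List String) (accessedRolls : Int) : Int :=
  let g := grid.map String.toList
  pvLoopA (g.length * (PySem.List.pyGetD g 0 []).length + 1) g accessedRolls

-- ===== PORT B =====
def pvDeltas : List Int := [-1, 0, 1]

-- B's neighbour count: membership in the coordinate set ((dr or dc) = not both zero)
def pvCountB (cells : List (Int × Int)) (r c : Int) : Int :=
  pvDeltas.foldl (fun n dr =>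
    pvDeltas.foldl (fun n dc =>
      if ¬(dr = 0 ∧ dc = 0) ∧ (r + dr, c + dc) ∈ cells then n + 1 else n) n) 0

-- building the set 'keep' by iterating over the set 'cells' (result is order-independent)
def pvKeep (cells : PySem.Set (Int × Int)) : PySem.Set (Int × Int) :=
  cells.foldl (fun keep p => if pvCountB cells p.1 p.2 ≥ 4 then PySem.Set.add keep p else keep)
    PySem.Set.empty

-- B's 'while True' loop; fuel = |cells| + 1 (each iteration strictly shrinks cells; proved below)
def pvLoopB (fuel : Nat) (cells : PySem.Set (Int × Int)) (total : Int) : Int :=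
  match fuel with
  | 0 => total
  | fuel + 1 =>
    let keep := pvKeep cells
    let removed : Int := PySem.Set.len cells - PySem.Set.len keep
    if removed = 0 then total else pvLoopB fuel keep (total + removed)

def access_rolls_alt (grid : List String) (accessedRolls : Int) : Int :=
  let g := grid.map String.toList
  let cells := PySem.Set.ofList
    ((PySem.List.pyRange 0 (g.length : Int)).flatMap (fun r =>
      (PySem.List.pyRange 0 (((PySem.List.pyGetD g 0 []).length : Nat) : Int)).filterMap (fun c =>
        if pvGet2 g r c = '@' then some (r, c) else none)))
  pvLoopB (cells.length + 1) cells accessedRolls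

-- ===== PRECONDITION & SPEC =====
-- Pre_ excludes exactly the inputs where A raises: the empty grid (grid[0] is an IndexError)
-- and grids with a row shorter than the first row (grid[line][column] is an IndexError there).
def Pre_access_rolls (grid : List String) (accessedRolls : Int) : Prop :=
  grid ≠ [] ∧ ∀ s ∈ grid, PySem.Str.len (grid.headD "") ≤ PySem.Str.len s
instance (grid : List String) (accessedRolls : Int) : Decidable (Pre_access_rolls grid accessedRolls) := by
  unfold Pre_access_rolls; infer_instance

def pvWitness_access_rolls : List String × Int := (["@.@", ".@.", "@.@"], 0)

def Spec_access_rolls (grid : List String) (accessedRolls : Int) (out : Int) : Prop := out = access_rolls_alt grid accessedRolls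
instance (grid : List String) (accessedRolls : Int) (out : Int) : Decidable (Spec_access_rolls grid accessedRolls out) := by unfold Spec_access_rolls; infer_instance

-- ===== CLAIM (what is proved, stated in full; the proofs are below) =====
def Claim_equal_access_rolls : Prop := ∀ (grid : List String) (accessedRolls : Int), Dom_access_rolls grid accessedRolls → Pre_access_rolls grid accessedRolls → Spec_access_rolls grid accessedRolls (access_rolls grid accessedRolls)

-- ===== LEMMAS AND PROOFS =====

-- abstractions used only by the proofs
def pvAt (g : List (List Char)) (p : Int × Int) : Bool := pvGet2 g p.1 p.2 == '@'

def pvAll (h w : Int) : List (Int × Int) :=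
  (PySem.List.pyRange 0 h).flatMap (fun r => (PySem.List.pyRange 0 w).map (fun c => (r, c)))

def pvRem (g : List (List Char)) (h w : Int) (p : Int × Int) : Bool :=
  pvAt g p && decide (pvCountA g h w p.1 p.2 < 4)

def pvCells (g : List (List Char)) (h w : Int) : List (Int × Int) :=
  (pvAll h w).filter (pvAt g)

def pvShape (g : List (List Char)) : Prop :=
  g ≠ [] ∧ ∀ row ∈ g, (PySem.List.pyGetD g 0 []).length ≤ row.length

-- foldl_count_if restated for a Prop condition
theorem pv_foldl_count_prop {α : Type} (P : α → Prop) [DecidablePred P] (l : List α) (n : Int) :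
    l.foldl (fun n x => if P x then n + 1 else n) n = n + (l.countP (fun x => decide (P x)) : Int) := by
  simpa using PySem.List.foldl_count_if (fun x => decide (P x)) l n

theorem pvAll_mem (h w : Int) (p : Int × Int) :
    p ∈ pvAll h w ↔ 0 ≤ p.1 ∧ p.1 < h ∧ 0 ≤ p.2 ∧ p.2 < w := by
  obtain ⟨a, b⟩ := p
  simp only [pvAll, List.mem_flatMap, List.mem_map, PySem.List.mem_pyRange_one, Prod.mk.injEq]
  constructor
  · rintro ⟨r, hr, c, hc, rfl, rfl⟩; exact ⟨hr.1, hr.2, hc.1, hc.2⟩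
  · rintro ⟨h1, h2, h3, h4⟩; exact ⟨a, ⟨h1, h2⟩, b, ⟨h3, h4⟩, rfl, rfl⟩

theorem pvAll_nodup (h w : Int) : (pvAll h w).Nodup := by
  rw [pvAll, List.nodup_flatMap]
  constructor
  · intro r _
    exact (PySem.List.nodup_pyRange_one 0 w).map (fun c1 c2 hcc => by simpa using congrArg Prod.snd hcc)
  · refine (PySem.List.pairwise_lt_pyRange_one 0 h).imp ?_
    intro a b hab x hx hy
    simp only [List.mem_map] at hx hy
    obtain ⟨c1, _, rfl⟩ := hx
    obtain ⟨c2, _, h2⟩ := hy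
    have := congrArg Prod.fst h2
    simp at this
    omega

theorem pvAll_length (h w : Nat) : (pvAll (h : Int) (w : Int)).length = h * w := by
  simp [pvAll, List.length_flatMap, PySem.List.length_pyRange_one]

-- B's set comprehension is pvCells
theorem pvCells_init (g : List (List Char)) (h w : Int) :
    (PySem.List.pyRange 0 h).flatMap (fun r =>
      (PySem.List.pyRange 0 w).filterMap (fun c => if pvGet2 g r c = '@' then some (r, c) else none))
    = pvCells g h w := by
  have row : ∀ (r : Int) (l : List Int),
      l.filterMap (fun c => if pvGet2 g r c = '@' then some (r, c) else none)
        = (l.map (fun c => (r, c))).filter (pvAt g) := by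
    intro r l
    induction l with
    | nil => rfl
    | cons c cs ih => by_cases hc : pvGet2 g r c = '@' <;> simp [pvAt, hc, ih]
  rw [pvCells, pvAll, List.filter_flatMap]
  exact List.flatMap_congr (fun r _ => row r _)

-- pvMark preserves every row length (when the marked column is in range)
theorem pvMark_lengths (f : List (List Char)) (line col : Int) (hl0 : 0 ≤ line)
    (hl : line.toNat < f.length) (hc0 : 0 ≤ col)
    (hc : col.toNat < (PySem.List.pyGetD f line []).length) :
    (pvMark f line col).map List.length = f.map List.length := by
  have hline : (line : Int) < (f.length : Int) := by omega
  have hrow : PySem.List.pyGetD f line [] = f[line.toNat] :=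
    PySem.List.pyGetD_eq_getElem f [] hl0 hline
  have hcol1 : (col + 1).toNat = col.toNat + 1 := by omega
  rw [pvMark, List.map_set, PySem.List.slice_to (PySem.List.pyGetD f line []) hc0,
      PySem.List.slice_from (PySem.List.pyGetD f line []) (by omega : (0:Int) ≤ col + 1)]
  apply List.ext_getElem?
  intro n
  rw [List.getElem?_set]
  split
  · rename_i hn
    subst hn
    rw [hrow] at hc ⊢
    simp [hl, hcol1]
    omega
  · rfl

-- pvMark writes 'x' at exactly the marked cell
theorem pvMark_get2 (f : List (List Char)) (line col : Int) (hl0 : 0 ≤ line)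
    (hl : line.toNat < f.length) (hc0 : 0 ≤ col)
    (hc : col.toNat < (PySem.List.pyGetD f line []).length) (i j : Int) (hi : 0 ≤ i) (hj : 0 ≤ j) :
    pvGet2 (pvMark f line col) i j = if i = line ∧ j = col then 'x' else pvGet2 f i j := by
  have hline : (line : Int) < (f.length : Int) := by omega
  have hrow : PySem.List.pyGetD f line [] = f[line.toNat] :=
    PySem.List.pyGetD_eq_getElem f [] hl0 hline
  have hcol1 : (col + 1).toNat = col.toNat + 1 := by omega
  rw [hrow] at hc
  have hlen : (List.take col.toNat f[line.toNat]).length = col.toNat := by simp; omega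
  unfold pvGet2 pvMark
  rw [PySem.List.slice_to (PySem.List.pyGetD f line []) hc0,
      PySem.List.slice_from (PySem.List.pyGetD f line []) (by omega : (0:Int) ≤ col + 1), hrow,
      PySem.List.pyGetD_of_nonneg _ _ hi, PySem.List.pyGetD_of_nonneg _ _ hi,
      List.getD_eq_getElem?_getD, List.getD_eq_getElem?_getD, List.getElem?_set]
  by_cases hik : line.toNat = i.toNat
  · have hil : i = line := by omega
    have hfi : f[i.toNat]? = some f[line.toNat] := by
      rw [← hik]; exact List.getElem?_eq_getElem hl
    rw [if_pos hik, if_pos hl, Option.getD_some, hfi, Option.getD_some,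
        PySem.List.pyGetD_of_nonneg _ _ hj, PySem.List.pyGetD_of_nonneg _ _ hj,
        List.getD_eq_getElem?_getD, List.getD_eq_getElem?_getD]
    by_cases hjc : j.toNat < col.toNat
    · have hjcol : ¬(i = line ∧ j = col) := by rintro ⟨rfl, rfl⟩; omega
      rw [if_neg hjcol,
          List.getElem?_append_left (by simp [hlen]; omega),
          List.getElem?_append_left (by simp [hlen]; omega),
          List.getElem?_take]
      simp [hjc]
    · by_cases hjc2 : j.toNat = col.toNat
      · have hjcol : j = col := by omega
        rw [if_pos ⟨hil, hjcol⟩,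
            List.getElem?_append_left (by simp [hlen]; omega),
            List.getElem?_append_right (by simp [hlen]; omega)]
        simp [hlen, hjc2]
      · have hjcol : ¬(i = line ∧ j = col) := by rintro ⟨rfl, rfl⟩; omega
        rw [if_neg hjcol,
            List.getElem?_append_right (by simp [hlen]; omega),
            List.getElem?_drop]
        congr 1
        simp [hlen, hcol1]
        congr 1
        omega
  · have hil : ¬(i = line ∧ j = col) := by rintro ⟨rfl, rfl⟩; omega
    rw [if_neg hik, if_neg hil]

-- characterisation of the grid component of a fold of conditional marks
theorem pvFoldMark_char (g : List (List Char)) (h w : Int) (hh : (g.length : Int) = h) :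
    ∀ (ps : List (Int × Int)) (f : List (List Char)),
      ps.Nodup → (∀ p ∈ ps, 0 ≤ p.1 ∧ p.1 < h ∧ 0 ≤ p.2 ∧ p.2 < w) →
      f.length = g.length → (∀ r ∈ f, w.toNat ≤ r.length) →
      (ps.foldl (fun f p => if pvRem g h w p then pvMark f p.1 p.2 else f) f).map List.length
          = f.map List.length
      ∧ ∀ (q : Int × Int), 0 ≤ q.1 → 0 ≤ q.2 →
          pvGet2 (ps.foldl (fun f p => if pvRem g h w p then pvMark f p.1 p.2 else f) f) q.1 q.2
            = if q ∈ ps ∧ pvRem g h w q then 'x' else pvGet2 f q.1 q.2 := by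
  intro ps
  induction ps with
  | nil => intro f _ _ _ _; simp
  | cons p ps ih =>
    intro f hnd hin hflen hrows
    have hp := hin p (by simp)
    have hpnotin : p ∉ ps := (List.nodup_cons.mp hnd).1
    by_cases hrem : pvRem g h w p
    · have hl0 : 0 ≤ p.1 := hp.1
      have hl : p.1.toNat < f.length := by omega
      have hwrow : w.toNat ≤ f[p.1.toNat].length := hrows _ (List.getElem_mem _)
      have hrow : PySem.List.pyGetD f p.1 [] = f[p.1.toNat] :=
        PySem.List.pyGetD_eq_getElem f [] hl0 (by omega)
      have hc : p.2.toNat < (PySem.List.pyGetD f p.1 []).length := by rw [hrow]; omega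
      have hlens := pvMark_lengths f p.1 p.2 hl0 hl hp.2.2.1 hc
      have hflen1 : (pvMark f p.1 p.2).length = f.length := by
        have := congrArg List.length hlens
        simpa using this
      have hrows' : ∀ r ∈ pvMark f p.1 p.2, w.toNat ≤ r.length := by
        intro r hr
        have hmem : r.length ∈ (pvMark f p.1 p.2).map List.length := List.mem_map_of_mem hr
        rw [hlens] at hmem
        obtain ⟨r0, hr0, he⟩ := List.mem_map.mp hmem
        rw [← he]; exact hrows r0 hr0
      obtain ⟨ihlen, ihget⟩ := ih (pvMark f p.1 p.2) hnd.of_cons (fun q hq => hin q (by simp [hq]))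
        (by rw [hflen1]; exact hflen) hrows'
      constructor
      · simp only [List.foldl_cons, if_pos hrem]
        rw [ihlen, hlens]
      · intro q hq1 hq2
        simp only [List.foldl_cons, if_pos hrem]
        rw [ihget q hq1 hq2]
        by_cases hqps : q ∈ ps ∧ pvRem g h w q = true
        · rw [if_pos hqps, if_pos ⟨by simp [hqps.1], hqps.2⟩]
        · rw [if_neg hqps, pvMark_get2 f p.1 p.2 hl0 hl hp.2.2.1 hc q.1 q.2 hq1 hq2]
          by_cases hqp : q = p
          · subst hqp
            rw [if_pos ⟨rfl, rfl⟩, if_pos ⟨by simp, hrem⟩]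
          · have h1 : ¬(q.1 = p.1 ∧ q.2 = p.2) := fun hc2 => hqp (Prod.ext hc2.1 hc2.2)
            have h2 : ¬(q ∈ p :: ps ∧ pvRem g h w q = true) := by
              rintro ⟨hmem, hr⟩
              rcases List.mem_cons.mp hmem with rfl | hmem2
              · exact hqp rfl
              · exact hqps ⟨hmem2, hr⟩
            rw [if_neg h1, if_neg h2]
    · simp only [List.foldl_cons, if_neg hrem]
      obtain ⟨ihlen, ihget⟩ := ih f hnd.of_cons (fun q hq => hin q (by simp [hq])) hflen hrows
      refine ⟨ihlen, ?_⟩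
      intro q hq1 hq2
      rw [ihget q hq1 hq2]
      by_cases hqps : q ∈ ps ∧ pvRem g h w q = true
      · rw [if_pos hqps, if_pos ⟨by simp [hqps.1], hqps.2⟩]
      · have h2 : ¬(q ∈ p :: ps ∧ pvRem g h w q = true) := by
          rintro ⟨hmem, hr⟩
          rcases List.mem_cons.mp hmem with rfl | hmem2
          · exact hrem hr
          · exact hqps ⟨hmem2, hr⟩
        rw [if_neg hqps, if_neg h2]

-- pvRound in closed form
theorem pvRound_char (g : List (List Char)) (h w : Int) :
    pvRound g h w
      = ((pvAll h w).foldl (fun f p => if pvRem g h w p then pvMark f p.1 p.2 else f) g,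
         ((pvAll h w).countP (pvRem g h w) : Int)) := by
  have main : pvRound g h w = (pvAll h w).foldl (fun st p =>
      if pvGet2 g p.1 p.2 = '@' then
        (if pvCountA g h w p.1 p.2 < 4 then (pvMark st.1 p.1 p.2, st.2 + 1) else st)
      else st) (g, 0) := by
    rw [pvRound, pvAll, List.foldl_flatMap]
    congr 1
    funext st line
    rw [List.foldl_map]
  have step_eq : (fun (st : List (List Char) × Int) (p : Int × Int) =>
      if pvGet2 g p.1 p.2 = '@' then
        (if pvCountA g h w p.1 p.2 < 4 then (pvMark st.1 p.1 p.2, st.2 + 1) else st)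
      else st)
    = (fun st p => ((fun f p => if pvRem g h w p = true then pvMark f p.1 p.2 else f) st.1 p,
                    (fun n p => if pvRem g h w p = true then n + 1 else n) st.2 p)) := by
    funext st p
    by_cases h1 : pvGet2 g p.1 p.2 = '@'
    · by_cases h2 : pvCountA g h w p.1 p.2 < 4 <;> simp [pvRem, pvAt, h1, h2]
    · simp [pvRem, pvAt, h1]
  rw [main, step_eq,
      PySem.List.foldl_prod_mk (fun f p => if pvRem g h w p = true then pvMark f p.1 p.2 else f)
        (fun n p => if pvRem g h w p = true then n + 1 else n) (pvAll h w) g 0]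
  congr 1
  rw [PySem.List.foldl_count_if]
  simp

-- the two neighbour counts agree when cells has the pvCells membership
theorem pvCount_eq (g : List (List Char)) (h w : Int) (cells : List (Int × Int))
    (hmem : ∀ q : Int × Int, q ∈ cells ↔ (0 ≤ q.1 ∧ q.1 < h ∧ 0 ≤ q.2 ∧ q.2 < w) ∧ pvGet2 g q.1 q.2 = '@')
    (r c : Int) :
    pvCountB cells r c = pvCountA g h w r c := by
  have hA : pvCountA g h w r c
      = 0 + ((pvDirs).countP (fun d => decide ((0 ≤ r + d.1 ∧ r + d.1 < h ∧ 0 ≤ c + d.2 ∧ c + d.2 < w) ∧ pvGet2 g (r + d.1) (c + d.2) = '@')) : Int) := by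
    rw [pvCountA]
    simp only [← ite_and]
    exact pv_foldl_count_prop _ _ 0
  have hB : pvCountB cells r c
      = 0 + (([(-1,-1),(-1,0),(-1,1),(0,-1),(0,0),(0,1),(1,-1),(1,0),(1,1)] : List (Int × Int)).countP
          (fun d => decide (¬(d.1 = 0 ∧ d.2 = 0) ∧ (r + d.1, c + d.2) ∈ cells)) : Int) := by
    have main : pvCountB cells r c
        = ([(-1,-1),(-1,0),(-1,1),(0,-1),(0,0),(0,1),(1,-1),(1,0),(1,1)] : List (Int × Int)).foldl
            (fun n d => if ¬(d.1 = 0 ∧ d.2 = 0) ∧ (r + d.1, c + d.2) ∈ cells then n + 1 else n) 0 := by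
      rw [pvCountB,
          show ([(-1,-1),(-1,0),(-1,1),(0,-1),(0,0),(0,1),(1,-1),(1,0),(1,1)] : List (Int × Int))
            = pvDeltas.flatMap (fun dr => pvDeltas.map (fun dc => (dr, dc))) from rfl,
          List.foldl_flatMap]
      congr 1
    rw [main]
    exact pv_foldl_count_prop _ _ 0
  rw [hA, hB]
  congr 2
  simp only [pvDirs, List.countP_cons, List.countP_nil]
  simp [hmem]

-- pvKeep on a duplicate-free list is a filter
theorem pvKeep_eq (cells : List (Int × Int)) (hnd : cells.Nodup) :
    pvKeep cells = cells.filter (fun p => decide (pvCountB cells p.1 p.2 ≥ 4)) := by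
  have gen : ∀ (l s : List (Int × Int)), l.Nodup → (∀ x ∈ l, x ∉ s) →
      l.foldl (fun k x => if pvCountB cells x.1 x.2 ≥ 4 then PySem.Set.add k x else k) s
        = s ++ l.filter (fun p => decide (pvCountB cells p.1 p.2 ≥ 4)) := by
    intro l
    induction l with
    | nil => intro s _ _; simp
    | cons x xs ih =>
      intro s hnd hdisj
      by_cases hx : pvCountB cells x.1 x.2 ≥ 4
      · have hadd : PySem.Set.add s x = s ++ [x] :=
          PySem.Set.add_of_not_mem (hdisj x (by simp))
        have := ih (s ++ [x]) hnd.of_cons (by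
          intro y hy
          simp only [List.mem_append, List.mem_singleton]
          rintro (h1 | rfl)
          · exact hdisj y (by simp [hy]) h1
          · exact (List.nodup_cons.mp hnd).1 hy)
        simp [List.foldl_cons, hx, hadd, this]
      · have := ih s hnd.of_cons (fun y hy => hdisj y (by simp [hy]))
        simp [List.foldl_cons, hx, this]
  have := gen cells PySem.Set.empty hnd (by intro x _; simp [PySem.Set.empty])
  simpa [pvKeep] using this

-- main induction
theorem pvLoop_eq (fa : Nat) : ∀ (g : List (List Char)) (acc : Int) (fb : Nat),
    pvShape g →
    (pvCells g (g.length : Int) (((PySem.List.pyGetD g 0 []).length : Nat) : Int)).length < fa →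
    (pvCells g (g.length : Int) (((PySem.List.pyGetD g 0 []).length : Nat) : Int)).length < fb →
    pvLoopA fa g acc
      = pvLoopB fb (pvCells g (g.length : Int) (((PySem.List.pyGetD g 0 []).length : Nat) : Int)) acc := by
  induction fa with
  | zero => intro g acc fb _ hfa _; omega
  | succ fa ih =>
    intro g acc fb hshape hfa hfb
    obtain ⟨hne, hrows⟩ := hshape
    set h : Int := (g.length : Int) with hh
    set w : Int := (((PySem.List.pyGetD g 0 []).length : Nat) : Int) with hw
    have hrowsN : ∀ r ∈ g, w.toNat ≤ r.length := by
      intro r hr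
      have := hrows r hr
      omega
    have hinall : ∀ p ∈ pvAll h w, 0 ≤ p.1 ∧ p.1 < h ∧ 0 ≤ p.2 ∧ p.2 < w :=
      fun p hp => (pvAll_mem h w p).mp hp
    obtain ⟨flens, fget⟩ := pvFoldMark_char g h w rfl (pvAll h w) g (pvAll_nodup h w) hinall rfl hrowsN
    set F := (pvAll h w).foldl (fun f p => if pvRem g h w p then pvMark f p.1 p.2 else f) g with hF
    set locN : Nat := (pvAll h w).countP (pvRem g h w) with hloc
    have stepA : pvLoopA (fa + 1) g acc
        = if (locN : Int) = 0 then acc else pvLoopA fa F (acc + (locN : Int)) := by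
      simp only [pvLoopA]
      rw [pvRound_char]
    -- B-side set
    set cells := pvCells g h w with hcells
    have hcnd : cells.Nodup := List.Nodup.filter _ (pvAll_nodup h w)
    have hmemc : ∀ q : (Int × Int), q ∈ cells ↔ (0 ≤ q.1 ∧ q.1 < h ∧ 0 ≤ q.2 ∧ q.2 < w) ∧ pvGet2 g q.1 q.2 = '@' := by
      intro q
      rw [hcells, pvCells, List.mem_filter]
      simp [pvAll_mem, pvAt]
    have hkeep : pvKeep cells = (pvAll h w).filter (fun p => pvAt g p && decide (pvCountA g h w p.1 p.2 ≥ 4)) := by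
      rw [pvKeep_eq cells hcnd]
      have hpred : (fun p : Int × Int => decide (pvCountB cells p.1 p.2 ≥ 4))
          = (fun p : Int × Int => decide (pvCountA g h w p.1 p.2 ≥ 4)) := by
        funext p
        rw [pvCount_eq g h w cells hmemc]
      rw [hpred, hcells, pvCells, List.filter_filter]
      apply List.filter_congr
      intro p _
      exact Bool.and_comm _ _
    -- counting
    have hclen : cells.length = (pvAll h w).countP (pvAt g) := by
      rw [hcells, pvCells, ← List.countP_eq_length_filter]
    have hklen : (pvKeep cells).length = (pvAll h w).countP (fun p => pvAt g p && decide (pvCountA g h w p.1 p.2 ≥ 4)) := by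
      rw [hkeep, ← List.countP_eq_length_filter]
    have hsplit : cells.length = locN + (pvKeep cells).length := by
      rw [hclen, hklen, hloc]
      have h1 := List.countP_eq_countP_filter_add (pvAll h w) (pvAt g)
        (fun p => decide (pvCountA g h w p.1 p.2 < 4))
      rw [List.countP_filter, List.countP_filter] at h1
      have e1 : List.countP (fun a => pvAt g a && decide (pvCountA g h w a.1 a.2 < 4)) (pvAll h w)
          = List.countP (pvRem g h w) (pvAll h w) := by
        apply List.countP_congr
        intro p _
        simp [pvRem]
      have e2 : List.countP (fun a => pvAt g a && !decide (pvCountA g h w a.1 a.2 < 4)) (pvAll h w)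
          = List.countP (fun p => pvAt g p && decide (pvCountA g h w p.1 p.2 ≥ 4)) (pvAll h w) := by
        apply List.countP_congr
        intro p _
        simp only [Bool.and_eq_true, decide_eq_true_eq, Bool.not_eq_true']
        constructor
        · rintro ⟨ha, hb⟩; exact ⟨ha, by simp at hb ⊢; omega⟩
        · rintro ⟨ha, hb⟩; exact ⟨ha, by simp at hb ⊢; omega⟩
      rw [h1, e1, e2]
    -- invariants of F
    have hFlen : F.length = g.length := by
      have := congrArg List.length flens
      simpa using this
    have optlen : ∀ (o : Option (List Char)), (o.getD []).length = (o.map List.length).getD 0 := by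
      intro o; cases o <;> rfl
    have hFrowlen : ∀ k : Nat, (F.getD k []).length = (g.getD k []).length := by
      intro k
      have hk := congrArg (fun l => l[k]?) flens
      simp only [List.getElem?_map] at hk
      rw [List.getD_eq_getElem?_getD, List.getD_eq_getElem?_getD, optlen, optlen, hk]
    have hgpos : 0 < g.length := List.length_pos_iff.mpr hne
    have hFne : F ≠ [] := by
      intro hFnil
      rw [hFnil] at hFlen
      simp at hFlen
      omega
    have hget0 : ∀ (f : List (List Char)), PySem.List.pyGetD f 0 [] = f.getD 0 [] := by
      intro f
      rw [PySem.List.pyGetD_of_nonneg f [] (by norm_num)]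
      norm_num
    have hwF : (((PySem.List.pyGetD F 0 []).length : Nat) : Int) = w := by
      rw [hget0, hFrowlen 0, ← hget0, hw]
    have hshapeF : pvShape F := by
      refine ⟨hFne, ?_⟩
      intro row hrow
      obtain ⟨k, hk, rfl⟩ := List.mem_iff_getElem.mp hrow
      have h1 : F[k] = F.getD k [] := by rw [List.getD_eq_getElem?_getD, List.getElem?_eq_getElem hk]; rfl
      have h2 : (g.getD k []).length ≥ (PySem.List.pyGetD g 0 []).length := by
        have hkg : k < g.length := by omega
        have : g.getD k [] = g[k] := by rw [List.getD_eq_getElem?_getD, List.getElem?_eq_getElem hkg]; rfl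
        rw [this]
        exact hrows g[k] (List.getElem_mem hkg)
      rw [hget0, hFrowlen 0, ← hget0, h1, hFrowlen k]
      omega
    have hcellsF : pvCells F h w = pvKeep cells := by
      rw [hkeep, pvCells]
      apply List.filter_congr
      intro p hp
      obtain ⟨hp1, hp2, hp3, hp4⟩ := hinall p hp
      have hg2 := fget p hp1 hp3
      by_cases hrem : pvRem g h w p = true
      · rw [if_pos ⟨hp, hrem⟩] at hg2
        have hxF : pvAt F p = false := by simp [pvAt, hg2]
        have hrem' := hrem
        simp only [pvRem, Bool.and_eq_true, decide_eq_true_eq] at hrem'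
        obtain ⟨hat, hlt⟩ := hrem'
        have hnge : ¬(pvCountA g h w p.1 p.2 ≥ 4) := by omega
        simp [hxF, hat, hnge]
      · rw [if_neg (by rintro ⟨_, hx⟩; exact hrem hx)] at hg2
        have hFg : pvAt F p = pvAt g p := by simp [pvAt, hg2]
        rw [hFg]
        by_cases hat : pvAt g p = true
        · have hge : pvCountA g h w p.1 p.2 ≥ 4 := by
            by_contra hlt
            exact hrem (by simp [pvRem, hat]; omega)
          simp [hat, hge]
        · simp only [Bool.not_eq_true] at hat
          simp [hat]
    rw [stepA]
    cases fb with
    | zero => omega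
    | succ fb =>
      have hrem_eq : PySem.Set.len cells - PySem.Set.len (pvKeep cells) = (locN : Int) := by
        simp only [PySem.Set.len]
        omega
      by_cases hz : locN = 0
      · have hzi : (locN : Int) = 0 := by exact_mod_cast hz
        rw [if_pos hzi]
        simp only [pvLoopB]
        rw [hrem_eq, if_pos hzi]
      · have hzi : ¬((locN : Int) = 0) := by exact_mod_cast hz
        rw [if_neg hzi]
        simp only [pvLoopB]
        rw [hrem_eq, if_neg hzi]
        have hhF : (F.length : Int) = h := by rw [hFlen]
        have hklen2 : (pvCells F ((F.length : Nat) : Int) (((PySem.List.pyGetD F 0 []).length : Nat) : Int)).length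
            = (pvKeep cells).length := by
          rw [hhF, hwF, hcellsF]
        have hm1 : (pvCells F ((F.length : Nat) : Int) (((PySem.List.pyGetD F 0 []).length : Nat) : Int)).length < fa := by
          rw [hklen2]; omega
        have hm2 : (pvCells F ((F.length : Nat) : Int) (((PySem.List.pyGetD F 0 []).length : Nat) : Int)).length < fb := by
          rw [hklen2]; omega
        have hmain := ih F (acc + (locN : Int)) fb hshapeF hm1 hm2
        rw [hhF, hwF, hcellsF] at hmain
        exact hmain


-- the two programs start from the same abstract state
theorem pv_start (g : List (List Char)) :
    PySem.Set.ofList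
      ((PySem.List.pyRange 0 (g.length : Int)).flatMap (fun r =>
        (PySem.List.pyRange 0 (((PySem.List.pyGetD g 0 []).length : Nat) : Int)).filterMap (fun c =>
          if pvGet2 g r c = '@' then some (r, c) else none)))
    = pvCells g (g.length : Int) (((PySem.List.pyGetD g 0 []).length : Nat) : Int) := by
  rw [pvCells_init]
  exact PySem.Set.ofList_eq_self_of_nodup _ (List.Nodup.filter _ (pvAll_nodup _ _))

-- ===== VERDICT (by name: the statement is the Claim_ definition above) =====
theorem access_rolls_spec : Claim_equal_access_rolls := by
  intro grid acc _hdom hpre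
  unfold Spec_access_rolls access_rolls access_rolls_alt
  dsimp only
  obtain ⟨hne, hlens⟩ := hpre
  set g := grid.map String.toList with hg
  have hgne : g ≠ [] := by
    rw [hg]
    simpa using hne
  have hhead : PySem.List.pyGetD g 0 [] = (grid.headD "").toList := by
    cases grid with
    | nil => exact absurd rfl hne
    | cons s t =>
      rw [PySem.List.pyGetD_of_nonneg _ _ (by norm_num)]
      simp [hg]
  have hshape : pvShape g := by
    refine ⟨hgne, ?_⟩
    intro row hrow
    obtain ⟨sstr, hs, rfl⟩ := List.mem_map.mp hrow
    have := hlens sstr hs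
    rw [PySem.Str.len_eq, PySem.Str.len_eq] at this
    rw [hhead]
    omega
  rw [pv_start]
  have hfuelA : (pvCells g (g.length : Int) (((PySem.List.pyGetD g 0 []).length : Nat) : Int)).length
      < g.length * (PySem.List.pyGetD g 0 []).length + 1 := by
    have h1 := List.length_filter_le (pvAt g)
      (pvAll (g.length : Int) (((PySem.List.pyGetD g 0 []).length : Nat) : Int))
    have h2 := pvAll_length g.length (PySem.List.pyGetD g 0 []).length
    rw [pvCells]
    omega
  exact pvLoop_eq _ g acc _ hshape hfuelA (by omega)
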